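-- pv_equiv track=rewrite | github.com/brightleeh/whisper-streaming-stt-server | tools/dashboard/plot_metrics.py | _default_fields
-- ===== SOURCE A (Python) =====
-- from typing import Dict, Iterable, List, Tuple
--
-- def _default_fields(records: Iterable[Dict[str, object]]) -> List[str]:
--     candidates = [
--         "system.process.rss_bytes",
--         "metrics.buffer_bytes_total",
--         "metrics.decode_pending",
--         "metrics.partial_drop_count",
--         "metrics.rate_limit_blocks.stream",
--     ]
--     available = set()
--     for record in records:
--         available.update(record.keys())
--     return [field for field in candidates if field in available]
-- ===== SOURCE B (Python) =====
-- from typing import Dict, Iterable, List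
--
-- def _default_fields(records: Iterable[Dict[str, object]]) -> List[str]:
--     candidates = [
--         "system.process.rss_bytes",
--         "metrics.buffer_bytes_total",
--         "metrics.decode_pending",
--         "metrics.partial_drop_count",
--         "metrics.rate_limit_blocks.stream",
--     ]
--     # Single pass keeping the shrinking worklist of candidates not yet seen;
--     # stop as soon as every candidate has been found.
--     missing = list(candidates)
--     for record in records:
--         if not missing:
--             break
--         missing = [c for c in missing if c not in record]
--     return [c for c in candidates if c not in missing]
-- ===== Notes on version B (the rewrite author's own statement) =====
-- stated objective: alternative
-- what changed: B never builds a union set of keys: it keeps a shrinking worklist of still-missing candidates, filters it against each record in one pass with early termination once the worklist is empty, and reconstructs the answer as the candidates not left missing.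
import Mathlib
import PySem

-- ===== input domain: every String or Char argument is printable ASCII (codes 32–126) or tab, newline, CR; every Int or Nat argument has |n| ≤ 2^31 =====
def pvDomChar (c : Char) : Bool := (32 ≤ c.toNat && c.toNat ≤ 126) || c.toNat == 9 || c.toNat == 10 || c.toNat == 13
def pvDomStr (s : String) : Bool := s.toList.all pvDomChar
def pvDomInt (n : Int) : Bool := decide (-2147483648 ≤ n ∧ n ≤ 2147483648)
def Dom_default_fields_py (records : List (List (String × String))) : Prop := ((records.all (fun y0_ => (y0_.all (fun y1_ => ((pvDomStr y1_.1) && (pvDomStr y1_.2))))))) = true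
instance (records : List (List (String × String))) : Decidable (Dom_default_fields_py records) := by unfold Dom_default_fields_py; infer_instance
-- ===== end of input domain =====

-- B replaces A's grow-a-union-set-then-filter by a single pass over the records that
-- shrinks a worklist of still-missing candidates (with early exit when it is empty);
-- alternative decomposition, same result.
-- ===== PORT A =====
def pvCandidates : List String :=
  ["system.process.rss_bytes",
   "metrics.buffer_bytes_total",
   "metrics.decode_pending",
   "metrics.partial_drop_count",
   "metrics.rate_limit_blocks.stream"]

def default_fields_py (records : List (List (String × String))) : List String :=
  let available : PySem.Set String :=
    records.foldl (fun s record => PySem.Set.update s (record.map Prod.fst)) PySem.Set.empty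
  pvCandidates.filter (fun field => PySem.Set.contains available field)

-- ===== PORT B =====
-- the for-loop with its early 'break': recursion over records carrying the missing worklist
def pvMissingLoop : List String → List (List (String × String)) → List String
  | missing, [] => missing
  | missing, record :: rest =>
    if missing.isEmpty then missing
    else pvMissingLoop (missing.filter (fun c => !(record.any (fun kv => kv.1 == c)))) rest

def default_fields_py_alt (records : List (List (String × String))) : List String :=
  let missing := pvMissingLoop pvCandidates records
  pvCandidates.filter (fun c => !(missing.contains c))

-- ===== PRECONDITION & SPEC =====
def Spec_default_fields_py (records : List (List (String × String))) (out : List String) : Prop := out = default_fields_py_alt records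
instance (records : List (List (String × String))) (out : List String) : Decidable (Spec_default_fields_py records out) := by unfold Spec_default_fields_py; infer_instance

-- ===== CLAIM (what is proved, stated in full; the proofs are below) =====
def Claim_equal_default_fields_py : Prop := ∀ (records : List (List (String × String))), Dom_default_fields_py records → Spec_default_fields_py records (default_fields_py records)

-- ===== LEMMAS AND PROOFS =====

lemma pv_contains_add (s : PySem.Set String) (x y : String) :
    (PySem.Set.add s x).contains y = (s.contains y || y == x) := by
  unfold PySem.Set.add
  by_cases hyx : y = x
  · by_cases hx : x ∈ s <;> simp [hx, hyx, List.contains_eq_mem]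
  · by_cases hx : x ∈ s <;> simp [hx, hyx, List.contains_eq_mem, List.mem_append]

lemma pv_contains_update (xs : List String) (s : PySem.Set String) (y : String) :
    (PySem.Set.update s xs).contains y = (s.contains y || xs.contains y) := by
  induction xs generalizing s with
  | nil => simp [PySem.Set.update, List.contains_eq_mem]
  | cons x xs ih =>
    show ((xs.foldl PySem.Set.add (PySem.Set.add s x)).contains y) = _
    rw [show xs.foldl PySem.Set.add (PySem.Set.add s x) = PySem.Set.update (PySem.Set.add s x) xs from rfl,
        ih, pv_contains_add]
    rw [Bool.eq_iff_iff]
    by_cases hyx : y = x <;> simp [hyx, List.contains_eq_mem]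

lemma pv_available (records : List (List (String × String))) (s : PySem.Set String) (f : String) :
    (records.foldl (fun s record => PySem.Set.update s (record.map Prod.fst)) s).contains f
      = (s.contains f || records.any (fun record => record.any (fun kv => kv.1 == f))) := by
  induction records generalizing s with
  | nil => simp
  | cons r rs ih =>
    simp only [List.foldl_cons, ih, pv_contains_update, List.any_cons, Bool.or_assoc]
    have h : (List.map Prod.fst r).contains f = (r.any fun kv => kv.1 == f) := by
      rw [Bool.eq_iff_iff]
      simp only [List.contains_eq_mem, List.mem_map, List.any_eq_true, beq_iff_eq,
        decide_eq_true_eq]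
    rw [h]

-- the worklist loop computes exactly the candidates no record contains
lemma pv_missing_loop (records : List (List (String × String))) (missing : List String) :
    pvMissingLoop missing records
      = missing.filter (fun c => records.all (fun record => !(record.any (fun kv => kv.1 == c)))) := by
  induction records generalizing missing with
  | nil => simp [pvMissingLoop]
  | cons r rs ih =>
    by_cases h : missing.isEmpty
    · rw [List.isEmpty_iff] at h
      simp [pvMissingLoop, h]
    · simp only [pvMissingLoop, h, ih, List.filter_filter]
      apply List.filter_congr
      intro c _
      simp [Bool.and_comm]

-- ===== VERDICT (by name: the statement is the Claim_ definition above) =====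
theorem default_fields_py_spec : Claim_equal_default_fields_py := by
  intro records _
  unfold Spec_default_fields_py default_fields_py default_fields_py_alt
  simp only [pv_missing_loop]
  apply List.filter_congr
  intro f hf
  rw [pv_available, Bool.eq_iff_iff]
  simp only [PySem.Set.contains, PySem.Set.empty, List.contains_eq_mem, List.mem_filter,
    List.not_mem_nil, decide_false, Bool.false_or, Bool.not_eq_true', decide_eq_false_iff_not,
    List.any_eq_true, List.all_eq_true, not_and]
  constructor
  · rintro ⟨r, hr, x, hx, hxf⟩ _ hall
    have := hall r hr
    rw [List.any_eq_false] at this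
    exact absurd hxf (by simpa using this x hx)
  · intro h
    by_contra hno
    refine h hf fun r hr => ?_
    rw [List.any_eq_false]
    intro x hx
    intro hxf
    exact hno ⟨r, hr, x, hx, hxf⟩
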